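-- pv_equiv track=rewrite | github.com/thandrangiashok/codemind-python | Count_sorted_columns_in_a_matrix.py | count_sorted_columns
-- ===== SOURCE A (Python) =====
-- def count_sorted_columns(matrixA):
--     rows = len(matrixA)
--     columns = len(matrixA[0])
--     count = 0
--
--     for col in range(columns):
--         is_sorted = True
--         for row in range(1, rows):
--             if matrixA[row][col] < matrixA[row-1][col]:
--                 is_sorted = False
--                 break
--         if is_sorted:
--             count += 1
--
--     return count
-- ===== SOURCE B (Python) =====
-- def count_sorted_columns(matrixA):
--     rows = len(matrixA)
--     columns = len(matrixA[0])
--     return sum(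
--         1 for c in range(columns)
--         if (col := [matrixA[r][c] for r in range(rows)]) == sorted(col)
--     )
-- ===== Notes on version B (the rewrite author's own statement) =====
-- stated objective: idiomatic
-- what changed: Replaces the early-break pairwise scan per column with building each column top-to-bottom and counting it when it equals its own sorted copy, summed by a generator expression.
-- outside the precondition, e.g. on count_sorted_columns([[2, 9], [1, 0], [0]]): A returns 0, B raises IndexError
import Mathlib
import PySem

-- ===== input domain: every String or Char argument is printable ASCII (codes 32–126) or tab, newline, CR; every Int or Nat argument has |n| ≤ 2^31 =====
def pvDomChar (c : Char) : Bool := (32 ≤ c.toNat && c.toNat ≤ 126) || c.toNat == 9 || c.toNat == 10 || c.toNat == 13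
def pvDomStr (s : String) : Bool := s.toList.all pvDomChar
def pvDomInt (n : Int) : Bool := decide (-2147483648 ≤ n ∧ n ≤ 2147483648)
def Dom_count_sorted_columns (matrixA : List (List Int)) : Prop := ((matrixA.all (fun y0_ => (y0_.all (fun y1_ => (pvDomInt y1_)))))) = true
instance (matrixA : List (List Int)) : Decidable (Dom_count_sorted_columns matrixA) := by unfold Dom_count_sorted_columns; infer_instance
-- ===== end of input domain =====

-- B builds each column as a list and counts it when it equals its own sorted copy, replacing A's early-break pairwise scan (alternative, not faster).


-- ===== PORT A =====
-- matrixA[row][col] read under Pre_ (all indices in range): pyGetD is exact there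
def count_sorted_columns (matrixA : List (List Int)) : Int :=
  let rows : Int := matrixA.length
  let columns : Int := (PySem.List.pyGetD matrixA 0 []).length
  (PySem.List.pyRange 0 columns 1).foldl (fun count col =>
    let is_sorted := (PySem.List.pyRange 1 rows 1).foldl (fun is_sorted row =>
      if !is_sorted then is_sorted  -- loop already broken
      else if PySem.List.pyGetD (PySem.List.pyGetD matrixA row []) col 0 <
              PySem.List.pyGetD (PySem.List.pyGetD matrixA (row - 1) []) col 0 then false
      else is_sorted) true
    if is_sorted then count + 1 else count) 0

-- ===== PORT B =====
-- the column comprehension [matrixA[r][c] for r in range(rows)]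
def pvColumn (matrixA : List (List Int)) (c : Int) : List Int :=
  (PySem.List.pyRange 0 (matrixA.length : Int) 1).map
    (fun r => PySem.List.pyGetD (PySem.List.pyGetD matrixA r []) c 0)

def count_sorted_columns_alt (matrixA : List (List Int)) : Int :=
  let columns : Int := (PySem.List.pyGetD matrixA 0 []).length
  ((PySem.List.pyRange 0 columns 1).map (fun c =>
    if pvColumn matrixA c = PySem.List.sorted (pvColumn matrixA c) (fun x => x) false
    then (1 : Int) else 0)).sum

-- ===== PRECONDITION & SPEC =====
-- Pre_ excludes the empty matrix (len(matrixA[0]) raises IndexError) and ragged matrices whose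
-- first row is longer than some other row, on which A's column reads can raise IndexError
-- (A still returns on a few such inputs when every such column breaks early — those stay excluded).
def Pre_count_sorted_columns (matrixA : List (List Int)) : Prop :=
  matrixA ≠ [] ∧ ∀ row ∈ matrixA, matrixA.headI.length ≤ row.length

instance (matrixA : List (List Int)) : Decidable (Pre_count_sorted_columns matrixA) := by
  unfold Pre_count_sorted_columns; infer_instance

def pvWitness_count_sorted_columns : List (List Int) := [[1, 2], [3, 1], [3, 5]]

def Spec_count_sorted_columns (matrixA : List (List Int)) (out : Int) : Prop := out = count_sorted_columns_alt matrixA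
instance (matrixA : List (List Int)) (out : Int) : Decidable (Spec_count_sorted_columns matrixA out) := by unfold Spec_count_sorted_columns; infer_instance

-- ===== CLAIM (what is proved, stated in full; the proofs are below) =====
def Claim_equal_count_sorted_columns : Prop := ∀ (matrixA : List (List Int)), Dom_count_sorted_columns matrixA → Pre_count_sorted_columns matrixA → Spec_count_sorted_columns matrixA (count_sorted_columns matrixA)

-- ===== LEMMAS AND PROOFS =====

-- the matrix entry both ports read
def pvEntry (matrixA : List (List Int)) (r c : Int) : Int :=
  PySem.List.pyGetD (PySem.List.pyGetD matrixA r []) c 0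

lemma pvColumn_length (matrixA : List (List Int)) (c : Int) :
    (pvColumn matrixA c).length = matrixA.length := by
  simp [pvColumn, PySem.List.pyRange_zero_natCast]

lemma pvColumn_getElem (matrixA : List (List Int)) (c : Int) (i : Nat)
    (h : i < matrixA.length) :
    (pvColumn matrixA c)[i]'(by simpa [pvColumn_length]) = pvEntry matrixA (i : Int) c := by
  simp [pvColumn, PySem.List.pyRange_zero_natCast, pvEntry]

-- A's inner loop (with the break guard) equals the guard-free loop, pointwise in the state
lemma innerA_eq_noguard (matrixA : List (List Int)) (col : Int) (rows : Int) :
    (PySem.List.pyRange 1 rows 1).foldl (fun is_sorted row =>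
      if !is_sorted then is_sorted
      else if pvEntry matrixA row col < pvEntry matrixA (row - 1) col then false
      else is_sorted) true
    = (PySem.List.pyRange 1 rows 1).foldl (fun is_sorted row =>
      if pvEntry matrixA row col < pvEntry matrixA (row - 1) col then false
      else is_sorted) true := by
  apply PySem.List.foldl_congr_mem
  intro acc x _
  cases acc <;> simp

-- A's per-column verdict as a quantifier
lemma innerA_iff (matrixA : List (List Int)) (col : Int) (rows : Int) :
    ((PySem.List.pyRange 1 rows 1).foldl (fun is_sorted row =>
      if !is_sorted then is_sorted
      else if pvEntry matrixA row col < pvEntry matrixA (row - 1) col then false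
      else is_sorted) true) = true
    ↔ ∀ row : Int, 1 ≤ row → row < rows → pvEntry matrixA (row - 1) col ≤ pvEntry matrixA row col := by
  rw [innerA_eq_noguard]
  rw [show (fun is_sorted row =>
      if pvEntry matrixA row col < pvEntry matrixA (row - 1) col then false
      else is_sorted) = (fun (is_sorted : Bool) row =>
      if decide (pvEntry matrixA row col < pvEntry matrixA (row - 1) col) = true then false
      else is_sorted) from by funext a b; simp]
  rw [PySem.List.foldl_if_false_eq]
  simp [List.any_eq, PySem.List.mem_pyRange_one]

-- B's per-column verdict: a list equals its own sorted copy iff it is pairwise ≤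
lemma eq_sorted_iff_pairwise (l : List Int) :
    l = PySem.List.sorted l (fun x => x) false ↔ l.Pairwise (· ≤ ·) := by
  constructor
  · intro h
    have := PySem.List.sorted_pairwise (xs := l) (key := fun x => x)
    rw [← h] at this
    simpa using this
  · intro h
    exact (PySem.List.sorted_eq_self_of_pairwise l (fun x => x) (by simpa using h)).symm

-- pairwise ≤ on the column is exactly the adjacent condition A checks
lemma column_pairwise_iff (matrixA : List (List Int)) (c : Int) :
    (pvColumn matrixA c).Pairwise (· ≤ ·)
    ↔ ∀ row : Int, 1 ≤ row → row < (matrixA.length : Int) →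
        pvEntry matrixA (row - 1) c ≤ pvEntry matrixA row c := by
  rw [← List.isChain_iff_pairwise, List.isChain_iff_getElem]
  constructor
  · intro h row h1 h2
    obtain ⟨n, hn⟩ := Int.eq_ofNat_of_zero_le (by omega : (0:Int) ≤ row - 1)
    have hlen : n + 1 < matrixA.length := by omega
    have := h n (by rw [pvColumn_length]; omega)
    rw [pvColumn_getElem matrixA c n (by omega), pvColumn_getElem matrixA c (n+1) hlen] at this
    have e1 : ((n : Nat) : Int) = row - 1 := hn.symm
    have e2 : (((n + 1 : Nat)) : Int) = row := by push_cast; omega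
    rw [e1, e2] at this
    exact this
  · intro h i hi
    rw [pvColumn_length] at hi
    rw [pvColumn_getElem matrixA c i (by omega), pvColumn_getElem matrixA c (i+1) hi]
    have := h ((i : Int) + 1) (by omega) (by omega)
    have e1 : ((i : Int) + 1) - 1 = (i : Int) := by ring
    have e2 : (((i + 1 : Nat)) : Int) = (i : Int) + 1 := by push_cast; ring
    rw [e1] at this
    rw [e2]
    exact this

-- per-column agreement of the two indicators (the shape of A's inner loop, closed per column)
lemma per_column (matrixA : List (List Int)) (c : Int) :
    ((PySem.List.pyRange 1 (matrixA.length : Int) 1).foldl (fun is_sorted row =>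
      if !is_sorted then is_sorted
      else if pvEntry matrixA row c < pvEntry matrixA (row - 1) c then false
      else is_sorted) true)
    = decide (pvColumn matrixA c = PySem.List.sorted (pvColumn matrixA c) (fun x => x) false) := by
  by_cases hp : (pvColumn matrixA c).Pairwise (· ≤ ·)
  · rw [(innerA_iff matrixA c (matrixA.length : Int)).mpr ((column_pairwise_iff matrixA c).mp hp)]
    exact (decide_eq_true ((eq_sorted_iff_pairwise _).mpr hp)).symm
  · have hA : ¬ ((PySem.List.pyRange 1 (matrixA.length : Int) 1).foldl (fun is_sorted row =>
        if !is_sorted then is_sorted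
        else if pvEntry matrixA row c < pvEntry matrixA (row - 1) c then false
        else is_sorted) true) = true :=
      fun h => hp ((column_pairwise_iff matrixA c).mpr ((innerA_iff matrixA c _).mp h))
    rw [Bool.not_eq_true] at hA
    rw [hA]
    symm
    simp only [decide_eq_false_iff_not]
    rw [eq_sorted_iff_pairwise]
    exact hp

-- ===== VERDICT (by name: the statement is the Claim_ definition above) =====
theorem count_sorted_columns_spec : Claim_equal_count_sorted_columns := by
  intro matrixA _ _
  unfold Spec_count_sorted_columns count_sorted_columns count_sorted_columns_alt
  have epent : ∀ r c' : Int,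
      PySem.List.pyGetD (PySem.List.pyGetD matrixA r []) c' 0 = pvEntry matrixA r c' :=
    fun _ _ => rfl
  simp only [epent, per_column, decide_eq_true_eq, PySem.List.foldl_ite_add_one,
    PySem.List.sum_map_ite_one_zero', zero_add]
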